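-- pv_equiv track=rewrite | github.com/vinares/Leet | Interview/2022/Codesignal/Citadel/Birthday Card Collection.py | hackerCards
-- ===== SOURCE A (Python) =====
-- def hackerCards(collection, d):
--     i, j = 1, 0
--     ans = []
--     tmp = set(collection)
--     collection = []
--     for elem in tmp:
--         collection.append(elem)
--     collection.sort()
--
--     while i <= d and j < len(collection):
--         if i < collection[j]:
--             ans.append(i)
--             d -= i
--             i += 1
--
--         elif i == collection[j]:
--             i += 1
--             j += 1
--         else:
--             j += 1
--     while i <= d:
--         ans.append(i)
--         d -= i
--         i+= 1
--
--     return ans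
-- ===== SOURCE B (Python) =====
-- def hackerCards(collection, d):
--     owned = set(collection)
--     ans = []
--     i = 1
--     while i <= d:
--         if i not in owned:
--             ans.append(i)
--             d -= i
--         i += 1
--     return ans
-- ===== Notes on version B (the rewrite author's own statement) =====
-- stated objective: simpler
-- what changed: Replaced A's dedup+sort plus two-pointer merge and its second cleanup loop by a single loop over i=1,2,... with one set-membership test (the sort and the merge disappear), which buys exactly the same cards.
import Mathlib
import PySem

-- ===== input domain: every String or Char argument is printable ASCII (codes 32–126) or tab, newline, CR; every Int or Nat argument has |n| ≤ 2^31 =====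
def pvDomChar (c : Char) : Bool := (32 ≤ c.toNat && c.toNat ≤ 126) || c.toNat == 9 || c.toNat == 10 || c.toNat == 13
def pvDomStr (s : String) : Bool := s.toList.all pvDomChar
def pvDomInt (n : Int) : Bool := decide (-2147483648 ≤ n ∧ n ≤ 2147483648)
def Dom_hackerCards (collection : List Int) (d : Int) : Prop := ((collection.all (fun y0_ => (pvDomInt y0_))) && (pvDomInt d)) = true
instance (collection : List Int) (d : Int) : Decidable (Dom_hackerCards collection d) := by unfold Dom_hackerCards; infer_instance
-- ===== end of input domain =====

-- B replaces A's dedup+sort and two-pointer merge (plus cleanup loop) by one loop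
-- over i = 1,2,… with a set-membership test; objective: simpler.

-- ===== PORT A =====
-- first while-loop of A: state (i, d, j, ans), three-way branch, returns the final state
def hcLoopA (cs : List Int) (i d : Int) (j : Nat) (ans : List Int) : Int × Int × List Int :=
  if h : i ≤ d ∧ j < cs.length then
    if i < cs[j]'h.2 then hcLoopA cs (i+1) (d - i) j (ans ++ [i])
    else if i = cs[j]'h.2 then hcLoopA cs (i+1) d (j+1) ans
    else hcLoopA cs i d (j+1) ans
  else (i, d, ans)
termination_by ((-i).toNat, (d - i + 1).toNat, cs.length - j)
decreasing_by
  · by_cases hi : 0 ≤ i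
    · apply Prod.Lex.right' <;> [omega; skip]
      apply Prod.Lex.left; omega
    · apply Prod.Lex.left; omega
  · by_cases hi : 0 ≤ i
    · apply Prod.Lex.right' <;> [omega; skip]
      apply Prod.Lex.left; omega
    · apply Prod.Lex.left; omega
  · apply Prod.Lex.right' <;> [omega; skip]
    apply Prod.Lex.right' <;> omega

-- second while-loop of A
def hcLoop2 (i d : Int) (ans : List Int) : List Int :=
  if i ≤ d then hcLoop2 (i+1) (d - i) (ans ++ [i]) else ans
termination_by ((-i).toNat, (d - i + 1).toNat)
decreasing_by
  by_cases hi : 0 ≤ i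
  · apply Prod.Lex.right' <;> omega
  · apply Prod.Lex.left; omega

def hackerCards (collection : List Int) (d : Int) : List Int :=
  -- set(collection) turned into a list and sorted (sort makes the set's order irrelevant)
  let cs := PySem.List.sorted (PySem.Set.ofList collection) (fun x => x) false
  let r := hcLoopA cs 1 d 0 []
  hcLoop2 r.1 r.2.1 r.2.2

-- ===== PORT B =====
-- B's single while-loop: buy i whenever it is not owned
def hcLoopB (owned : List Int) (i d : Int) (ans : List Int) : List Int :=
  if i ≤ d then
    if i ∈ owned then hcLoopB owned (i+1) d ans
    else hcLoopB owned (i+1) (d - i) (ans ++ [i])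
  else ans
termination_by ((-i).toNat, (d - i + 1).toNat)
decreasing_by
  · by_cases hi : 0 ≤ i
    · apply Prod.Lex.right' <;> omega
    · apply Prod.Lex.left; omega
  · by_cases hi : 0 ≤ i
    · apply Prod.Lex.right' <;> omega
    · apply Prod.Lex.left; omega

def hackerCards_alt (collection : List Int) (d : Int) : List Int :=
  hcLoopB (PySem.Set.ofList collection) 1 d []

-- ===== PRECONDITION & SPEC =====
def Spec_hackerCards (collection : List Int) (d : Int) (out : List Int) : Prop := out = hackerCards_alt collection d
instance (collection : List Int) (d : Int) (out : List Int) : Decidable (Spec_hackerCards collection d out) := by unfold Spec_hackerCards; infer_instance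

-- ===== CLAIM (what is proved, stated in full; the proofs are below) =====
def Claim_equal_hackerCards : Prop := ∀ (collection : List Int) (d : Int), Dom_hackerCards collection d → Spec_hackerCards collection d (hackerCards collection d)

-- ===== LEMMAS AND PROOFS =====

-- A's second loop is B's loop over the empty set
theorem hcLoop2_eq_loopB_nil (i d : Int) (ans : List Int) :
    hcLoop2 i d ans = hcLoopB [] i d ans := by
  induction i, d, ans using hcLoop2.induct with
  | case1 i d ans h ih => rw [hcLoop2, hcLoopB]; simp [h, ih]
  | case2 i d ans h => rw [hcLoop2, hcLoopB]; simp [h]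

-- an owned card smaller than the current index never matters again
theorem hcLoopB_cons_lt (x : Int) (owned : List Int) (i d : Int) (ans : List Int)
    (hx : x < i) : hcLoopB (x :: owned) i d ans = hcLoopB owned i d ans := by
  induction i, d, ans using hcLoopB.induct owned with
  | case1 i d ans h hm ih =>
    have hx' : i ∈ x :: owned := List.mem_cons_of_mem _ hm
    conv_lhs => rw [hcLoopB]
    conv_rhs => rw [hcLoopB]
    simp only [h, if_pos, hx', hm]
    exact ih (by omega)
  | case2 i d ans h hm ih =>
    have hx' : i ∉ x :: owned := by simp [hm]; omega
    conv_lhs => rw [hcLoopB]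
    conv_rhs => rw [hcLoopB]
    simp only [h, if_pos, hx', hm, if_false]
    exact ih (by omega)
  | case3 i d ans h =>
    conv_lhs => rw [hcLoopB]
    conv_rhs => rw [hcLoopB]
    simp [h]

-- membership-equivalent owned lists give the same loop result
theorem hcLoopB_congr (l1 l2 : List Int) (i d : Int) (ans : List Int)
    (h : ∀ y, y ∈ l1 ↔ y ∈ l2) : hcLoopB l1 i d ans = hcLoopB l2 i d ans := by
  induction i, d, ans using hcLoopB.induct l1 with
  | case1 i d ans hle hm ih =>
    conv_lhs => rw [hcLoopB]
    conv_rhs => rw [hcLoopB]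
    simp only [hle, if_pos, hm, (h i).mp hm]
    exact ih
  | case2 i d ans hle hm ih =>
    have hm2 : i ∉ l2 := fun hx => hm ((h i).mpr hx)
    conv_lhs => rw [hcLoopB]
    conv_rhs => rw [hcLoopB]
    simp only [hle, if_pos, hm, hm2, if_false]
    exact ih
  | case3 i d ans hle =>
    conv_lhs => rw [hcLoopB]
    conv_rhs => rw [hcLoopB]
    simp [hle]

-- main invariant: A's two-pointer loop followed by its cleanup loop equals B's loop
-- over the not-yet-passed part of the sorted distinct list
theorem hcLoopA_eq_loopB (cs : List Int) (hcs : cs.Pairwise (· < ·))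
    (i d : Int) (j : Nat) (ans : List Int) :
    hcLoop2 (hcLoopA cs i d j ans).1 (hcLoopA cs i d j ans).2.1 (hcLoopA cs i d j ans).2.2
      = hcLoopB (cs.drop j) i d ans := by
  induction i, d, j, ans using hcLoopA.induct cs with
  | case1 i d j ans h hlt ih =>
    -- buy: i < cs[j], so i is in none of drop j
    have hdrop : cs.drop j = cs[j]'h.2 :: cs.drop (j+1) := (List.getElem_cons_drop h.2).symm
    have hnm : i ∉ cs.drop j := by
      intro hm
      rw [hdrop] at hm
      rcases List.mem_cons.mp hm with heq | hm
      · omega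
      · have := (List.pairwise_cons.mp (hdrop ▸ List.Pairwise.drop (i := j) hcs)).1 i hm
        omega
    rw [hcLoopA, dif_pos h, if_pos hlt, ih]
    conv_rhs => rw [hcLoopB]
    simp [h.1, hnm]
  | case2 i d j ans h hlt heq ih =>
    have hdrop : cs.drop j = cs[j]'h.2 :: cs.drop (j+1) := (List.getElem_cons_drop h.2).symm
    rw [hcLoopA, dif_pos h, if_neg hlt, if_pos heq, ih]
    conv_rhs => rw [hdrop, hcLoopB]
    have hm : i ∈ cs[j]'h.2 :: cs.drop (j+1) := List.mem_cons.mpr (Or.inl heq)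
    simp only [h.1, if_pos, hm]
    rw [hcLoopB_cons_lt _ _ _ _ _ (by omega)]
  | case3 i d j ans h hlt heq ih =>
    rw [hcLoopA, dif_pos h, if_neg hlt, if_neg heq, ih]
    conv_rhs => rw [(List.getElem_cons_drop h.2).symm, hcLoopB_cons_lt _ _ _ _ _ (by omega)]
  | case4 i d j ans h =>
    rw [hcLoopA, dif_neg h]
    rcases Decidable.not_and_iff_or_not.mp h with hd | hj
    · rw [hcLoop2, hcLoopB]; simp [hd]
    · have : cs.drop j = [] := List.drop_eq_nil_of_le (by omega)
      rw [this, hcLoop2_eq_loopB_nil]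

-- ===== VERDICT (by name: the statement is the Claim_ definition above) =====
theorem hackerCards_spec : Claim_equal_hackerCards := by
  intro collection d _
  unfold Spec_hackerCards hackerCards hackerCards_alt
  have hp : (PySem.List.sorted (PySem.Set.ofList collection) (fun x => x) false).Pairwise (· < ·) :=
    PySem.List.sorted_ofList_pairwise_lt collection
  rw [hcLoopA_eq_loopB _ hp 1 d 0 []]
  simp only [List.drop_zero]
  exact hcLoopB_congr _ _ 1 d [] (fun y => by
    simp [PySem.List.mem_sorted])
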